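-- pv_equiv track=rewrite | github.com/ThunderBroJohn/SeniorProject | modules.py | reminder_prep
-- ===== SOURCE A (Python) =====
-- def reminder_prep(textInput):
--     splitInput = textInput.split()
--     hour = 0
--     minute = 0
--     AMPM = False
--
--
--     index = 0
--     noteThis = []
--     for word in splitInput:
--         if(word == "reminder"):
--             noteThis = splitInput[index+1:-2]
--         if(word == "at"):
--             number = int(splitInput[index+1])
--             hour = number // 100
--             minute = number % 100
--             if(splitInput[index+1] == "P" or splitInput[index+1] == "PM"):
--                 AMPM = True
--         index += 1
--     if(AMPM):
--         hour = hour + 12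
--
--     joinedNote = " "
--     joinedNote = joinedNote.join(noteThis)
--     return joinedNote, hour, minute
-- ===== SOURCE B (Python) =====
-- def reminder_prep(textInput):
--     words = textInput.split()
--     note = ""
--     hour = 0
--     minute = 0
--     if "reminder" in words:
--         r = len(words) - 1 - words[::-1].index("reminder")
--         note = " ".join(words[r + 1:-2])
--     if "at" in words:
--         a = len(words) - 1 - words[::-1].index("at")
--         hour, minute = divmod(int(words[a + 1]), 100)
--     return note, hour, minute
-- ===== Notes on version B (the rewrite author's own statement) =====
-- stated objective: simpler
-- what changed: A's single stateful scan (manual index, running hour/minute/AMPM/note state, dead AM/PM branch) is replaced by two direct last-occurrence lookups: find the last 'reminder' and the last 'at' via reversed-list index, then extract the note with one slice and the time with one divmod.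
import Mathlib
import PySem

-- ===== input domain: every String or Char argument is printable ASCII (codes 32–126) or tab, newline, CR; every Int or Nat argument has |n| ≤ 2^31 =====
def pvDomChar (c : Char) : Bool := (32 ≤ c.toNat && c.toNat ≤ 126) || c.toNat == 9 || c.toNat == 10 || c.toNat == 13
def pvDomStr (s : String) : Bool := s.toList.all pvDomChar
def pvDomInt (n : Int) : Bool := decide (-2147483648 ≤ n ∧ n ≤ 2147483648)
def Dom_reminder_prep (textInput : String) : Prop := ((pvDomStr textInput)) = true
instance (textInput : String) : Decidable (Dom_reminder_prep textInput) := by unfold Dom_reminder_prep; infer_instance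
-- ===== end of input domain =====

-- B replaces A's stateful indexed scan by direct last-occurrence lookups for "reminder"/"at"
-- followed by a slice and a divmod, dropping A's AM/PM branch, which is unreachable whenever A
-- returns (objective: simpler).

-- ===== PORT A =====
-- one iteration of A's loop; state (index, hour, minute, AMPM, noteThis)
def pvStepA (all : List String) (st : Int × Int × Int × Bool × List String) (w : String) :
    Int × Int × Int × Bool × List String :=
  let (i, h, m, amp, note) := st
  let note := if w = "reminder" then PySem.List.slice all (some (i + 1)) (some (-2)) else note
  if w = "at" then
    let t := PySem.List.pyGetD all (i + 1) ""          -- splitInput[index+1]; IndexError excluded by Pre_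
    let n := (PySem.Int.ofStr? t).getD 0               -- int(...); ValueError excluded by Pre_
    (i + 1, PySem.Int.floordiv n 100, PySem.Int.mod n 100, amp || (t == "P" || t == "PM"), note)
  else (i + 1, h, m, amp, note)

def reminder_prep (textInput : String) : String × Int × Int :=
  let splitInput := PySem.Str.split₀ textInput
  let st := splitInput.foldl (pvStepA splitInput) (0, 0, 0, false, [])
  let hour := if st.2.2.2.1 then st.2.1 + 12 else st.2.1
  (PySem.Str.join " " st.2.2.2.2, hour, st.2.2.1)

-- ===== PORT B =====
def reminder_prep_alt (textInput : String) : String × Int × Int :=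
  let words := PySem.Str.split₀ textInput
  let note :=
    if "reminder" ∈ words then
      -- r = len(words) - 1 - words[::-1].index("reminder"); words[::-1] = reverse (slice?_none_none_neg_one)
      let r : Nat := words.length - 1 - ((PySem.List.index? words.reverse "reminder").getD 0)
      PySem.Str.join " " (PySem.List.slice words (some ((r : Int) + 1)) (some (-2)))
    else ""
  if "at" ∈ words then
    let a : Nat := words.length - 1 - ((PySem.List.index? words.reverse "at").getD 0)
    let n := (PySem.Int.ofStr? (PySem.List.pyGetD words ((a : Int) + 1) "")).getD 0
    (note, PySem.Int.floordiv n 100, PySem.Int.mod n 100)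
  else (note, 0, 0)

-- ===== PRECONDITION & SPEC =====
-- Pre_ excludes exactly the inputs on which A raises: some word "at" is the last word (IndexError)
-- or is followed by a word int() cannot parse (ValueError).
def Pre_reminder_prep (textInput : String) : Prop :=
  ∀ k : Nat, k < (PySem.Str.split₀ textInput).length →
    (PySem.Str.split₀ textInput).getD k "" = "at" →
      k + 1 < (PySem.Str.split₀ textInput).length ∧
      (PySem.Int.ofStr? ((PySem.Str.split₀ textInput).getD (k + 1) "")).isSome = true
instance (textInput : String) : Decidable (Pre_reminder_prep textInput) := by
  unfold Pre_reminder_prep; infer_instance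

def pvWitness_reminder_prep : String := "set a reminder buy milk today at 1745 please thanks"

def Spec_reminder_prep (textInput : String) (out : String × Int × Int) : Prop := out = reminder_prep_alt textInput
instance (textInput : String) (out : String × Int × Int) : Decidable (Spec_reminder_prep textInput out) := by unfold Spec_reminder_prep; infer_instance

-- ===== CLAIM (what is proved, stated in full; the proofs are below) =====
def Claim_equal_reminder_prep : Prop := ∀ (textInput : String), Dom_reminder_prep textInput → Pre_reminder_prep textInput → Spec_reminder_prep textInput (reminder_prep textInput)

-- ===== LEMMAS AND PROOFS =====

-- index of the LAST occurrence of t in ws (none if absent), defined structurally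
def pvLastPos? (ws : List String) (t : String) : Option Nat :=
  match ws with
  | [] => none
  | w :: rest =>
    match pvLastPos? rest t with
    | some j => some (j + 1)
    | none => if w = t then some 0 else none

lemma pvLastPos?_eq_reverse (ws : List String) (t : String) :
    pvLastPos? ws t = (PySem.List.index? ws.reverse t).map (fun k => ws.length - 1 - k) := by
  induction ws with
  | nil => simp [pvLastPos?, PySem.List.index?_eq_idxOf?]
  | cons w rest ih =>
    by_cases hm : t ∈ rest
    · obtain ⟨k, hk⟩ : ∃ k, PySem.List.index? rest.reverse t = some k :=
        Option.isSome_iff_exists.1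
          ((PySem.List.index?_isSome_iff (xs := rest.reverse) (v := t)).2 (by simpa using hm))
      have hklt : k < rest.length := by
        obtain ⟨hlt, -, -⟩ := PySem.List.getElem_of_index?_eq_some hk
        simpa using hlt
      have hidx : PySem.List.index? (rest.reverse ++ [w]) t = some k := by
        rw [PySem.List.index?_append_of_mem [w] (by simpa using hm)]; exact hk
      rw [List.reverse_cons, hidx]
      rw [PySem.List.index?_eq_idxOf?] at hk
      simp only [pvLastPos?, ih, PySem.List.index?_eq_idxOf?, hk, Option.map_some,
        List.length_cons]
      congr 1
      omega
    · have hnone : PySem.List.index? rest.reverse t = none :=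
        (PySem.List.index?_eq_none_iff _ _).2 (by simpa using hm)
      by_cases hw : w = t
      · subst hw
        have hself : PySem.List.index? (rest.reverse ++ [w]) w = some rest.reverse.length :=
          PySem.List.index?_append_singleton_self rest.reverse w (by simpa using hm)
        rw [List.reverse_cons, hself]
        rw [PySem.List.index?_eq_idxOf?] at hnone
        simp only [pvLastPos?, ih, PySem.List.index?_eq_idxOf?, hnone, Option.map_none,
          Option.map_some, List.length_cons, List.length_reverse]
        simp
      · have hno2 : PySem.List.index? (rest.reverse ++ [w]) t = none := by
          rw [PySem.List.index?_eq_none_iff]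
          simp [hm, Ne.symm hw]
        rw [List.reverse_cons, hno2]
        rw [PySem.List.index?_eq_idxOf?] at hnone
        simp [pvLastPos?, ih, hnone, hw]

lemma pvOfStr?_not_PM {t : String} (h : (PySem.Int.ofStr? t).isSome = true) :
    (t == "P" || t == "PM") = false := by
  by_cases h1 : t = "P"
  · subst h1; exact absurd h (by decide)
  · by_cases h2 : t = "PM"
    · subst h2; exact absurd h (by decide)
    · simp [h1, h2]

def pvH (all : List String) (i : Int) : Int :=
  PySem.Int.floordiv ((PySem.Int.ofStr? (PySem.List.pyGetD all (i + 1) "")).getD 0) 100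

def pvM (all : List String) (i : Int) : Int :=
  PySem.Int.mod ((PySem.Int.ofStr? (PySem.List.pyGetD all (i + 1) "")).getD 0) 100

-- characterisation of A's loop over a segment `pre` starting at index i0, assuming no int() raise
set_option maxHeartbeats 1000000 in
lemma pvFoldA (all : List String) (pre : List String) (i0 : Int) (h m : Int) (amp : Bool)
    (note : List String)
    (H : ∀ k : Nat, k < pre.length → pre.getD k "" = "at" →
      (PySem.Int.ofStr? (PySem.List.pyGetD all (i0 + k + 1) "")).isSome = true) :
    pre.foldl (pvStepA all) (i0, h, m, amp, note) =
      (i0 + pre.length,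
       (match pvLastPos? pre "at" with
        | some j => pvH all (i0 + j)
        | none => h),
       (match pvLastPos? pre "at" with
        | some j => pvM all (i0 + j)
        | none => m),
       amp,
       (match pvLastPos? pre "reminder" with
        | some j => PySem.List.slice all (some (i0 + j + 1)) (some (-2))
        | none => note)) := by
  induction pre generalizing i0 h m amp note with
  | nil => simp [pvLastPos?]
  | cons w rest ih =>
    have Hrest : ∀ k : Nat, k < rest.length → rest.getD k "" = "at" →
        (PySem.Int.ofStr? (PySem.List.pyGetD all ((i0 + 1) + k + 1) "")).isSome = true := by
      intro k hk hat
      have h' := H (k + 1) (by simp; omega) (by simpa using hat)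
      have e : i0 + ((k : Int) + 1) + 1 = (i0 + 1) + k + 1 := by ring
      rw [Nat.cast_add, Nat.cast_one, e] at h'
      exact h'
    by_cases haw : w = "at"
    · subst haw
      have hS : (PySem.Int.ofStr? (PySem.List.pyGetD all (i0 + 1) "")).isSome = true := by
        have h0 := H 0 (by simp) (by simp)
        rwa [Nat.cast_zero, add_zero] at h0
      have hPM := pvOfStr?_not_PM hS
      have hstep : pvStepA all (i0, h, m, amp, note) "at" =
          (i0 + 1, pvH all i0, pvM all i0, amp, note) := by
        simp [pvStepA, pvH, pvM, hPM]
      rw [List.foldl_cons, hstep, ih (i0 + 1) _ _ _ _ Hrest]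
      simp only [pvLastPos?, List.length_cons]
      rcases hA : pvLastPos? rest "at" with _ | j <;>
        rcases hR : pvLastPos? rest "reminder" with _ | j'
      all_goals simp only [reduceIte, Nat.cast_zero, add_zero, Nat.cast_add, Nat.cast_one]
      all_goals (try (push_cast; ring_nf))
    · have hstep : pvStepA all (i0, h, m, amp, note) w =
          (i0 + 1, h, m, amp,
            if w = "reminder" then PySem.List.slice all (some (i0 + 1)) (some (-2)) else note) := by
        simp [pvStepA, haw]
      rw [List.foldl_cons, hstep, ih (i0 + 1) _ _ _ _ Hrest]
      simp only [pvLastPos?, List.length_cons]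
      rcases hA : pvLastPos? rest "at" with _ | j <;>
        rcases hR : pvLastPos? rest "reminder" with _ | j' <;>
          by_cases hwr : w = "reminder"
      all_goals simp only [haw, hwr, if_true, if_false, Nat.cast_zero,
        add_zero, Nat.cast_add, Nat.cast_one]
      all_goals (try (push_cast; ring_nf))

-- ===== VERDICT (by name: the statement is the Claim_ definition above) =====
theorem reminder_prep_spec : Claim_equal_reminder_prep := by
  intro textInput _ hPre
  unfold Spec_reminder_prep reminder_prep reminder_prep_alt
  have hjoin : PySem.Str.join " " ([] : List String) = "" := by decide
  have H : ∀ k : Nat, k < (PySem.Str.split₀ textInput).length →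
      (PySem.Str.split₀ textInput).getD k "" = "at" →
      (PySem.Int.ofStr? (PySem.List.pyGetD (PySem.Str.split₀ textInput) ((0 : Int) + k + 1) "")).isSome = true := by
    intro k hk hat
    have e : (0 : Int) + k + 1 = ((k + 1 : Nat) : Int) := by push_cast; ring
    rw [e, PySem.List.pyGetD_natCast]
    exact (hPre k hk hat).2
  have hfold := pvFoldA (PySem.Str.split₀ textInput) (PySem.Str.split₀ textInput) 0 0 0 false [] H
  rw [pvLastPos?_eq_reverse, pvLastPos?_eq_reverse] at hfold
  simp only [hfold]
  rcases hA : PySem.List.index? (PySem.Str.split₀ textInput).reverse "at" with _ | k <;>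
    rcases hR : PySem.List.index? (PySem.Str.split₀ textInput).reverse "reminder" with _ | k'
  · have hmA : ¬ ("at" ∈ PySem.Str.split₀ textInput) := by
      have := (PySem.List.index?_eq_none_iff _ _).1 hA; simpa using this
    have hmR : ¬ ("reminder" ∈ PySem.Str.split₀ textInput) := by
      have := (PySem.List.index?_eq_none_iff _ _).1 hR; simpa using this
    simp [hmA, hmR, hjoin]
  · have hmA : ¬ ("at" ∈ PySem.Str.split₀ textInput) := by
      have := (PySem.List.index?_eq_none_iff _ _).1 hA; simpa using this
    have hmR : "reminder" ∈ PySem.Str.split₀ textInput := by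
      have := (PySem.List.index?_isSome_iff (xs := (PySem.Str.split₀ textInput).reverse) (v := "reminder")).1 (by rw [hR]; rfl)
      simpa using this
    simp [hmA, hmR]
  · have hmA : "at" ∈ PySem.Str.split₀ textInput := by
      have := (PySem.List.index?_isSome_iff (xs := (PySem.Str.split₀ textInput).reverse) (v := "at")).1 (by rw [hA]; rfl)
      simpa using this
    have hmR : ¬ ("reminder" ∈ PySem.Str.split₀ textInput) := by
      have := (PySem.List.index?_eq_none_iff _ _).1 hR; simpa using this
    simp [hmA, hmR, hjoin, pvH, pvM]
  · have hmA : "at" ∈ PySem.Str.split₀ textInput := by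
      have := (PySem.List.index?_isSome_iff (xs := (PySem.Str.split₀ textInput).reverse) (v := "at")).1 (by rw [hA]; rfl)
      simpa using this
    have hmR : "reminder" ∈ PySem.Str.split₀ textInput := by
      have := (PySem.List.index?_isSome_iff (xs := (PySem.Str.split₀ textInput).reverse) (v := "reminder")).1 (by rw [hR]; rfl)
      simpa using this
    simp [hmA, hmR, pvH, pvM]
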